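-- pv_equiv track=rewrite | github.com/Probst1nator/CLI-Agent | agent/llm_selection/llm_selector.py | _estimate_context_window
-- ===== SOURCE A (Python) =====
-- def _estimate_context_window(model_key: str) -> int:
--     """
--     Estimate context window length based on model name patterns.
--     Returns reasonable estimates for common Ollama models.
--     """
--     model_lower = model_key.lower()
--
--     # Context window estimates based on model families
--     if any(x in model_lower for x in ['llama3.3', 'llama3.2', 'llama3.1']):
--         return 128000  # Most Llama 3.x models support 128k context
--     elif 'llama3' in model_lower:
--         return 8192    # Base Llama 3 models
--     elif any(x in model_lower for x in ['llama2', 'llama']):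
--         return 4096    # Llama 2 and earlier
--
--     elif any(x in model_lower for x in ['qwen2.5', 'qwen3']):
--         return 128000  # Qwen 2.5+ supports long context
--     elif 'qwen2' in model_lower:
--         return 32768   # Qwen 2
--     elif 'qwen' in model_lower:
--         return 8192    # Earlier Qwen models
--
--     elif any(x in model_lower for x in ['mistral', 'mixtral']):
--         if 'mixtral' in model_lower:
--             return 32768  # Mixtral MoE models
--         else:
--             return 32768  # Mistral models
--
--     elif any(x in model_lower for x in ['phi3.5', 'phi-3.5']):
--         return 128000  # Phi 3.5 long context
--     elif any(x in model_lower for x in ['phi3', 'phi-3']):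
--         return 4096    # Phi 3 base models
--     elif 'phi' in model_lower:
--         return 2048    # Earlier Phi models
--
--     elif any(x in model_lower for x in ['gemma2', 'gemma-2']):
--         return 8192    # Gemma 2
--     elif 'gemma' in model_lower:
--         return 8192    # Gemma models
--
--     elif any(x in model_lower for x in ['codellama', 'code-llama']):
--         return 16384   # CodeLlama models
--     elif any(x in model_lower for x in ['deepseek-coder', 'deepseek']):
--         return 16384   # DeepSeek Coder
--
--     elif any(x in model_lower for x in ['embed', 'embedding']):
--         return 512     # Embedding models typically have smaller context
--
--     else:
--         return 8192    # Conservative default for unknown models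
-- ===== SOURCE B (Python) =====
-- # Inverted matching: instead of testing each known pattern for containment in the
-- # model name, enumerate the name's substrings (of bounded length) and look each one
-- # up in a hash map pattern -> (priority, context); the lowest-priority hit wins.
-- # Intended fix: 'codellama'/'code-llama' gets priority 0, so CodeLlama models return
-- # 16384 (in A that branch is dead code because 'codellama' contains 'llama').
-- _CTX = {
--     'codellama': (0, 16384), 'code-llama': (0, 16384),
--     'llama3.3': (1, 128000), 'llama3.2': (1, 128000), 'llama3.1': (1, 128000),
--     'llama3': (2, 8192),
--     'llama2': (3, 4096), 'llama': (3, 4096),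
--     'qwen2.5': (4, 128000), 'qwen3': (4, 128000),
--     'qwen2': (5, 32768),
--     'qwen': (6, 8192),
--     'mistral': (7, 32768), 'mixtral': (7, 32768),
--     'phi3.5': (8, 128000), 'phi-3.5': (8, 128000),
--     'phi3': (9, 4096), 'phi-3': (9, 4096),
--     'phi': (10, 2048),
--     'gemma2': (11, 8192), 'gemma-2': (11, 8192),
--     'gemma': (12, 8192),
--     'deepseek-coder': (13, 16384), 'deepseek': (13, 16384),
--     'embed': (14, 512), 'embedding': (14, 512),
-- }
-- _MAXLEN = 14  # length of the longest key in _CTX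
--
--
-- def _estimate_context_window(model_key: str) -> int:
--     ml = model_key.lower()
--     n = len(ml)
--     best = None
--     for i in range(n):
--         for j in range(i + 1, min(i + _MAXLEN, n) + 1):
--             entry = _CTX.get(ml[i:j])
--             if entry is not None and (best is None or entry[0] < best[0]):
--                 best = entry
--     return best[1] if best is not None else 8192
-- ===== Notes on version B (the rewrite author's own statement) =====
-- stated objective: alternative
-- what changed: Inverts the matching: instead of an if/elif chain testing each known pattern for containment in the name, B enumerates the name's substrings of length <= 14 and looks each up in a hash map pattern -> (priority, context), returning the context of the lowest-priority hit (8192 if none); it also gives 'codellama'/'code-llama' priority 0 so the CodeLlama value is reachable.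
-- intended difference: On model names containing 'codellama' or 'code-llama', A's dedicated 16384 branch is dead code (such names contain 'llama' and hit an earlier llama branch, returning 4096/8192/128000); B returns the intended 16384 for CodeLlama models. — e.g. on _estimate_context_window("codellama"): A returns 4096, B returns 16384
import Mathlib
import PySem

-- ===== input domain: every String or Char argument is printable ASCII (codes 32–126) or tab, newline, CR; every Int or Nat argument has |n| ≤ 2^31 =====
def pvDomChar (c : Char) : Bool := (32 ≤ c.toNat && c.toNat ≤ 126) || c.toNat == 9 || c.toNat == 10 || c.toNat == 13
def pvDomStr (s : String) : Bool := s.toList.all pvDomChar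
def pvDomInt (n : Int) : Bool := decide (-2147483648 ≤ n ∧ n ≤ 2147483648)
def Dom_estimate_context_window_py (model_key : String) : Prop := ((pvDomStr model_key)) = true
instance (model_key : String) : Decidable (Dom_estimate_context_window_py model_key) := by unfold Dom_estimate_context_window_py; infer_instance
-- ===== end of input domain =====

-- B inverts the matching: it enumerates the lowered name's substrings of length ≤ 14 and looks
-- each up in a map pattern → (priority, context), keeping the lowest-priority hit; it also gives
-- codellama/code-llama priority 0 so the CodeLlama value is reachable (intended difference D_).

-- ===== PORT A =====
def estimate_context_window_py (model_key : String) : Int :=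
  let ml := PySem.Str.lower model_key
  if ["llama3.3", "llama3.2", "llama3.1"].any (fun x => PySem.Str.isIn x ml) then 128000
  else if PySem.Str.isIn "llama3" ml then 8192
  else if ["llama2", "llama"].any (fun x => PySem.Str.isIn x ml) then 4096
  else if ["qwen2.5", "qwen3"].any (fun x => PySem.Str.isIn x ml) then 128000
  else if PySem.Str.isIn "qwen2" ml then 32768
  else if PySem.Str.isIn "qwen" ml then 8192
  else if ["mistral", "mixtral"].any (fun x => PySem.Str.isIn x ml) then
    (if PySem.Str.isIn "mixtral" ml then 32768 else 32768)
  else if ["phi3.5", "phi-3.5"].any (fun x => PySem.Str.isIn x ml) then 128000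
  else if ["phi3", "phi-3"].any (fun x => PySem.Str.isIn x ml) then 4096
  else if PySem.Str.isIn "phi" ml then 2048
  else if ["gemma2", "gemma-2"].any (fun x => PySem.Str.isIn x ml) then 8192
  else if PySem.Str.isIn "gemma" ml then 8192
  else if ["codellama", "code-llama"].any (fun x => PySem.Str.isIn x ml) then 16384
  else if ["deepseek-coder", "deepseek"].any (fun x => PySem.Str.isIn x ml) then 16384
  else if ["embed", "embedding"].any (fun x => PySem.Str.isIn x ml) then 512
  else 8192

-- ===== PORT B =====
-- the dict _CTX of Source B: pattern → (priority, context window)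
def pvCtx : PySem.Dict String (Int × Int) := PySem.Dict.mk
  [ ("codellama", (0, 16384)), ("code-llama", (0, 16384)),
    ("llama3.3", (1, 128000)), ("llama3.2", (1, 128000)), ("llama3.1", (1, 128000)),
    ("llama3", (2, 8192)),
    ("llama2", (3, 4096)), ("llama", (3, 4096)),
    ("qwen2.5", (4, 128000)), ("qwen3", (4, 128000)),
    ("qwen2", (5, 32768)),
    ("qwen", (6, 8192)),
    ("mistral", (7, 32768)), ("mixtral", (7, 32768)),
    ("phi3.5", (8, 128000)), ("phi-3.5", (8, 128000)),
    ("phi3", (9, 4096)), ("phi-3", (9, 4096)),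
    ("phi", (10, 2048)),
    ("gemma2", (11, 8192)), ("gemma-2", (11, 8192)),
    ("gemma", (12, 8192)),
    ("deepseek-coder", (13, 16384)), ("deepseek", (13, 16384)),
    ("embed", (14, 512)), ("embedding", (14, 512)) ]

def estimate_context_window_py_alt (model_key : String) : Int :=
  let ml := PySem.Str.lower model_key
  let n : Int := PySem.Str.len ml
  let best :=
    (PySem.List.pyRange 0 n 1).foldl (fun best i =>
      (PySem.List.pyRange (i + 1) (min (i + 14) n + 1) 1).foldl (fun best j =>
        match pvCtx.get? (PySem.Str.slice ml (some i) (some j)) with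
        | some entry =>
            match best with
            | none => some entry
            | some b => if entry.1 < b.1 then some entry else best
        | none => best) best) none
  match best with
  | some b => b.2
  | none => 8192

-- ===== PRECONDITION & SPEC =====
-- On names containing 'codellama' or 'code-llama', A's 16384 branch is dead code (such names
-- contain 'llama' and hit an earlier llama branch, returning 4096/8192/128000); B returns the
-- intended 16384 for CodeLlama models.
def D_estimate_context_window_py (model_key : String) : Prop :=
  PySem.Str.isIn "codellama" (PySem.Str.lower model_key) = true ∨
  PySem.Str.isIn "code-llama" (PySem.Str.lower model_key) = true
instance (model_key : String) : Decidable (D_estimate_context_window_py model_key) := by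
  unfold D_estimate_context_window_py; infer_instance
def Spec_estimate_context_window_py (model_key : String) (out : Int) : Prop :=
  ¬ D_estimate_context_window_py model_key → out = estimate_context_window_py_alt model_key
instance (model_key : String) (out : Int) : Decidable (Spec_estimate_context_window_py model_key out) := by
  unfold Spec_estimate_context_window_py; infer_instance
def pvDiffWitness_estimate_context_window_py : String := "codellama"
def pvDiffWitnessOut_estimate_context_window_py : Int × Int := (4096, 16384)

-- ===== CLAIM (what is proved, stated in full; the proofs are below) =====
def Claim_unchanged_estimate_context_window_py : Prop := ∀ (model_key : String), Dom_estimate_context_window_py model_key → Spec_estimate_context_window_py model_key (estimate_context_window_py model_key)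
def Claim_changed_estimate_context_window_py : Prop := Dom_estimate_context_window_py (pvDiffWitness_estimate_context_window_py) ∧ D_estimate_context_window_py (pvDiffWitness_estimate_context_window_py) ∧ estimate_context_window_py (pvDiffWitness_estimate_context_window_py) = pvDiffWitnessOut_estimate_context_window_py.1 ∧ estimate_context_window_py_alt (pvDiffWitness_estimate_context_window_py) = pvDiffWitnessOut_estimate_context_window_py.2 ∧ pvDiffWitnessOut_estimate_context_window_py.1 ≠ pvDiffWitnessOut_estimate_context_window_py.2
def Claim_exact_estimate_context_window_py : Prop := ∀ (model_key : String), Dom_estimate_context_window_py model_key → D_estimate_context_window_py model_key → estimate_context_window_py model_key ≠ estimate_context_window_py_alt model_key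

-- ===== LEMMAS AND PROOFS =====

-- A's priority rows, in chain order: (patterns, (priority, context)); proof-side only.
def pvRows : List (List String × (Int × Int)) :=
  [ (["codellama", "code-llama"], (0, 16384)),
    (["llama3.3", "llama3.2", "llama3.1"], (1, 128000)),
    (["llama3"], (2, 8192)),
    (["llama2", "llama"], (3, 4096)),
    (["qwen2.5", "qwen3"], (4, 128000)),
    (["qwen2"], (5, 32768)),
    (["qwen"], (6, 8192)),
    (["mistral", "mixtral"], (7, 32768)),
    (["phi3.5", "phi-3.5"], (8, 128000)),
    (["phi3", "phi-3"], (9, 4096)),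
    (["phi"], (10, 2048)),
    (["gemma2", "gemma-2"], (11, 8192)),
    (["gemma"], (12, 8192)),
    (["deepseek-coder", "deepseek"], (13, 16384)),
    (["embed", "embedding"], (14, 512)) ]

-- the state-update of B's inner loop, on an already looked-up entry
def pvStep (best : Option (Int × Int)) (entry : Int × Int) : Option (Int × Int) :=
  match best with
  | none => some entry
  | some b => if entry.1 < b.1 then some entry else best

-- the (i, j) index pairs B's two loops visit
def pvPairs (n : Int) : List (Int × Int) :=
  (PySem.List.pyRange 0 n 1).flatMap (fun i =>
    (PySem.List.pyRange (i + 1) (min (i + 14) n + 1) 1).map (fun j => (i, j)))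

-- the matched dict entries, in visit order
def pvMatches (ml : String) : List (Int × Int) :=
  (pvPairs (PySem.Str.len ml)).filterMap (fun ij => pvCtx.get? (PySem.Str.slice ml (some ij.1) (some ij.2)))


-- folding pvStep over the looked-up entries = folding the lookup step over the index pairs
theorem pv_foldl_filterMap (f : Int × Int → Option (Int × Int)) (L : List (Int × Int))
    (st : Option (Int × Int)) :
    (L.filterMap f).foldl pvStep st =
      L.foldl (fun best ij => match f ij with | some e => pvStep best e | none => best) st := by
  induction L generalizing st with
  | nil => rfl
  | cons x L ih => cases hfx : f x <;> simp [hfx, ih]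

theorem pv_alt_eq_fold (model_key : String) :
    estimate_context_window_py_alt model_key =
      (match (pvMatches (PySem.Str.lower model_key)).foldl pvStep none with
        | some b => b.2
        | none => 8192) := by
  have hfun : ∀ (ml : String) (i : Int),
      (fun (best : Option (Int × Int)) (j : Int) =>
        match pvCtx.get? (PySem.Str.slice ml (some i) (some j)) with
        | some entry =>
            match best with
            | none => some entry
            | some b => if entry.1 < b.1 then some entry else best
        | none => best) =
      (fun (best : Option (Int × Int)) (j : Int) =>
        match pvCtx.get? (PySem.Str.slice ml (some i) (some j)) with
        | some e => pvStep best e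
        | none => best) := by
    intro ml i; funext best j
    cases pvCtx.get? (PySem.Str.slice ml (some i) (some j)) <;> rfl
  simp only [estimate_context_window_py_alt, pvMatches, pvPairs, pv_foldl_filterMap,
    List.foldl_flatMap, List.foldl_map, hfun]


-- pvStep never returns none
theorem pvStep_ne_none (st : Option (Int × Int)) (x : Int × Int) : pvStep st x ≠ none := by
  cases st <;> simp only [pvStep]
  · simp
  · split <;> simp

-- fold produces none only from nothing
theorem pv_fold_eq_none {E : List (Int × Int)} {st : Option (Int × Int)}
    (h : E.foldl pvStep st = none) : st = none ∧ E = [] := by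
  induction E generalizing st with
  | nil => exact ⟨h, rfl⟩
  | cons x E ih =>
      obtain ⟨h1, -⟩ := ih h
      exact absurd h1 (pvStep_ne_none st x)

-- the fold's result is the state or an element of the list
theorem pv_fold_mem {E : List (Int × Int)} {st : Option (Int × Int)} {e : Int × Int}
    (h : E.foldl pvStep st = some e) : st = some e ∨ e ∈ E := by
  induction E generalizing st with
  | nil => exact Or.inl h
  | cons x E ih =>
      rcases ih h with h' | h'
      · cases st with
        | none =>
            simp only [pvStep, Option.some.injEq] at h'
            exact Or.inr (h' ▸ List.mem_cons_self)
        | some b =>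
            simp only [pvStep] at h'
            split at h'
            · rw [Option.some.injEq] at h'
              exact Or.inr (h' ▸ List.mem_cons_self)
            · exact Or.inl h'
      · exact Or.inr (List.mem_cons_of_mem _ h')


-- the fold's priority never exceeds the state's priority
theorem pv_fold_min_st {E : List (Int × Int)} {st : Option (Int × Int)} {e : Int × Int}
    (h : E.foldl pvStep st = some e) : ∀ b, st = some b → e.1 ≤ b.1 := by
  induction E generalizing st with
  | nil => intro b hb; rw [hb] at h; cases h; exact le_refl _
  | cons x E ih =>
      intro b hb
      subst hb
      have := ih h
      simp only [pvStep] at this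
      split at this
      · next hlt => exact le_of_lt (lt_of_le_of_lt (this _ rfl) hlt)
      · exact this _ rfl

-- after one step from st, the state's priority is at most x's
theorem pvStep_le (st : Option (Int × Int)) (x : Int × Int) :
    ∃ c, pvStep st x = some c ∧ c.1 ≤ x.1 := by
  cases st with
  | none => exact ⟨x, rfl, le_refl _⟩
  | some b =>
      simp only [pvStep]
      split
      · exact ⟨x, rfl, le_refl _⟩
      · next hnlt => exact ⟨b, rfl, le_of_not_gt hnlt⟩

-- the fold's result has minimal priority
theorem pv_fold_min {E : List (Int × Int)} {st : Option (Int × Int)} {e : Int × Int}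
    (h : E.foldl pvStep st = some e) : ∀ e' ∈ E, ¬ e'.1 < e.1 := by
  induction E generalizing st with
  | nil => intro e' he'; cases he'
  | cons x E ih =>
      intro e' he'
      rcases List.mem_cons.mp he' with rfl | hmem
      · obtain ⟨c, hc, hcx⟩ := pvStep_le st e'
        rw [List.foldl_cons, hc] at h
        have := pv_fold_min_st h c rfl
        omega
      · exact ih h e' hmem


-- concrete facts about the table (checked by the kernel)
theorem pv_keys_nodup : pvCtx.keys.Nodup := by decide

theorem pv_len_bounds : ∀ pe ∈ pvCtx.items, 1 ≤ pe.1.toList.length ∧ pe.1.toList.length ≤ 14 := by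
  decide

theorem pv_rows_sub : ∀ row ∈ pvRows, ∀ p ∈ row.1, (p, row.2) ∈ pvCtx.items := by decide

theorem pv_item_row : ∀ pe ∈ pvCtx.items, ∃ row ∈ pvRows, pe.1 ∈ row.1 ∧ pe.2 = row.2 := by decide

theorem pv_rank_val : ∀ r ∈ pvRows, ∀ r' ∈ pvRows, r.2.1 = r'.2.1 → r.2.2 = r'.2.2 := by decide

-- an entry is matched iff its pattern occurs in the lowered name
theorem pv_mem_matches_iff (ml : String) (e : Int × Int) :
    e ∈ pvMatches ml ↔ ∃ p, (p, e) ∈ pvCtx.items ∧ PySem.Str.isIn p ml = true := by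
  constructor
  · intro h
    obtain ⟨ij, hij, hget⟩ := List.mem_filterMap.mp h
    refine ⟨PySem.Str.slice ml (some ij.1) (some ij.2),
      PySem.Dict.mem_items_of_get?_eq_some _ hget, ?_⟩
    unfold pvPairs at hij
    obtain ⟨i, hi, hmap⟩ := List.mem_flatMap.mp hij
    obtain ⟨j, hjr, rfl⟩ := List.mem_map.mp hmap
    rw [PySem.List.mem_pyRange_one] at hi hjr
    have h0i : (0 : Int) ≤ i := hi.1
    have h0j : (0 : Int) ≤ j := by omega
    rw [PySem.Str.isIn_iff_infix, PySem.Str.toList_slice]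
    simp only [PySem.Chars.slice_eq_listSlice]
    rw [PySem.List.slice_toNat ml.toList h0i h0j]
    exact (List.IsPrefix.isInfix (List.take_prefix _ _)).trans
      (List.IsSuffix.isInfix (List.drop_suffix _ _))
  · rintro ⟨p, hp, hocc⟩
    obtain ⟨hL1, hL14⟩ := pv_len_bounds (p, e) hp
    simp only at hL1 hL14
    have hc : PySem.Chars.isIn p.toList ml.toList = true := by
      rw [← PySem.Str.isIn_eq]; exact hocc
    obtain ⟨k, hpre⟩ := (PySem.Chars.exists_prefix_drop_iff_isIn _ _).mpr hc
    have hkL : k + p.toList.length ≤ ml.toList.length := by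
      have := hpre.length_le
      rw [List.length_drop] at this
      omega
    have hslice : PySem.Str.slice ml (some (k : Int)) (some ((k : Int) + (p.toList.length : Int))) = p := by
      rw [← String.toList_inj, PySem.Str.toList_slice]
      simp only [PySem.Chars.slice_eq_listSlice]
      rw [PySem.List.slice_natCast_add]
      exact (List.prefix_iff_eq_take.mp hpre).symm
    refine List.mem_filterMap.mpr ⟨((k : Int), (k : Int) + (p.toList.length : Int)), ?_, ?_⟩
    · unfold pvPairs
      refine List.mem_flatMap.mpr ⟨(k : Int), ?_,
        List.mem_map.mpr ⟨(k : Int) + (p.toList.length : Int), ?_, rfl⟩⟩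
      · rw [PySem.List.mem_pyRange_one, PySem.Str.len_eq]
        omega
      · rw [PySem.List.mem_pyRange_one, PySem.Str.len_eq]
        omega
    · simp only
      rw [hslice]
      exact PySem.Dict.get?_of_mem_items _ hp pv_keys_nodup

-- master lemma: if some row of priority k matches and no row of smaller priority does,
-- B returns row k's context value
set_option maxHeartbeats 1000000 in
theorem pv_alt_eq_of_row (model_key : String) (k v : Int)
    (hwit : ∃ row ∈ pvRows, row.2 = (k, v) ∧
      row.1.any (fun p => PySem.Str.isIn p (PySem.Str.lower model_key)) = true)
    (hlow : ∀ row ∈ pvRows, row.2.1 < k →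
      row.1.any (fun p => PySem.Str.isIn p (PySem.Str.lower model_key)) = false) :
    estimate_context_window_py_alt model_key = v := by
  rw [pv_alt_eq_fold]
  obtain ⟨row', hrow', hrv, hany⟩ := hwit
  obtain ⟨p', hp'mem, hp'occ⟩ := List.any_eq_true.mp hany
  have hE : row'.2 ∈ pvMatches (PySem.Str.lower model_key) :=
    (pv_mem_matches_iff _ _).mpr ⟨p', pv_rows_sub row' hrow' p' hp'mem, hp'occ⟩
  cases hfold : (pvMatches (PySem.Str.lower model_key)).foldl pvStep none with
  | none =>
      have := (pv_fold_eq_none hfold).2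
      rw [this] at hE
      cases hE
  | some e =>
      have he : e ∈ pvMatches (PySem.Str.lower model_key) := by
        rcases pv_fold_mem hfold with h | h
        · cases h
        · exact h
      obtain ⟨p, hp, hpocc⟩ := (pv_mem_matches_iff _ _).mp he
      obtain ⟨row, hrow, hprow, herow⟩ := pv_item_row (p, e) hp
      have herow' : e = row.2 := herow
      have hge : ¬ e.1 < k := by
        intro hlt
        have hfalse := hlow row hrow (by rw [← herow']; exact hlt)
        have hT : row.1.any (fun q => PySem.Str.isIn q (PySem.Str.lower model_key)) = true :=
          List.any_eq_true.mpr ⟨p, hprow, hpocc⟩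
        rw [hfalse] at hT
        cases hT
      have hle : ¬ row'.2.1 < e.1 := pv_fold_min hfold row'.2 hE
      rw [hrv] at hle
      have hek : e.1 = k := by omega
      have hval : e.2 = v := by
        have hrr := pv_rank_val row hrow row' hrow' (by rw [← herow', hek, hrv])
        rw [herow', hrr, hrv]
      simp only [hval]

-- if no row matches, B returns the default
set_option maxHeartbeats 1000000 in
theorem pv_alt_default (model_key : String)
    (h : ∀ row ∈ pvRows, row.1.any (fun p => PySem.Str.isIn p (PySem.Str.lower model_key)) = false) :
    estimate_context_window_py_alt model_key = 8192 := by
  rw [pv_alt_eq_fold]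
  have hnil : pvMatches (PySem.Str.lower model_key) = [] := by
    rw [List.eq_nil_iff_forall_not_mem]
    intro e he
    obtain ⟨p, hp, hpocc⟩ := (pv_mem_matches_iff _ _).mp he
    obtain ⟨row, hrow, hprow, -⟩ := pv_item_row (p, e) hp
    have hfalse := h row hrow
    have hT : row.1.any (fun q => PySem.Str.isIn q (PySem.Str.lower model_key)) = true :=
      List.any_eq_true.mpr ⟨p, hprow, hpocc⟩
    rw [hfalse] at hT
    cases hT
  rw [hnil]
  rfl

-- inside D_, the lowered name contains "llama"
theorem pv_llama_of_D (model_key : String) (hD : D_estimate_context_window_py model_key) :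
    PySem.Str.isIn "llama" (PySem.Str.lower model_key) = true := by
  rw [PySem.Str.isIn_iff_infix]
  cases hD with
  | inl h =>
      exact List.IsInfix.trans (by decide : ("llama".toList <:+: "codellama".toList))
        ((PySem.Str.isIn_iff_infix _ _).mp h)
  | inr h =>
      exact List.IsInfix.trans (by decide : ("llama".toList <:+: "code-llama".toList))
        ((PySem.Str.isIn_iff_infix _ _).mp h)

-- inside D_, B returns 16384 (row 0 matches and has least priority)
theorem pv_alt_of_D (model_key : String) (hD : D_estimate_context_window_py model_key) :
    estimate_context_window_py_alt model_key = 16384 := by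
  apply pv_alt_eq_of_row model_key 0 16384
  · refine ⟨(["codellama", "code-llama"], (0, 16384)), by decide, rfl, ?_⟩
    simp only [List.any_cons, List.any_nil, Bool.or_eq_true]
    cases hD with
    | inl h => exact Or.inl h
    | inr h => exact Or.inr (Or.inl h)
  · intro row hrow hlt
    fin_cases hrow <;> simp_all

-- ===== VERDICT (by name: the statement is the Claim_ definition above) =====
set_option maxHeartbeats 1000000 in
theorem estimate_context_window_py_spec : Claim_unchanged_estimate_context_window_py := by
  intro model_key _ hD
  simp only [D_estimate_context_window_py, not_or, Bool.not_eq_true] at hD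
  obtain ⟨h01, h02⟩ := hD
  have c0 : (["codellama", "code-llama"].any (fun x => PySem.Str.isIn x (PySem.Str.lower model_key))) = false := by
    simp only [List.any_cons, List.any_nil, Bool.or_false, h01, h02]
  by_cases c1 : (["llama3.3", "llama3.2", "llama3.1"].any (fun x => PySem.Str.isIn x (PySem.Str.lower model_key))) = true
  · have hB := pv_alt_eq_of_row model_key 1 128000
      ⟨(["llama3.3", "llama3.2", "llama3.1"], ((1 : Int), (128000 : Int))), by decide, rfl, c1⟩
      (by intro row hrow hlt; fin_cases hrow <;> simp_all)
    have hA : estimate_context_window_py model_key = 128000 := by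
      simp only [estimate_context_window_py, c0, c1, if_true, Bool.false_eq_true, if_false, ite_self]
    rw [hA, hB]
  rw [Bool.not_eq_true] at c1
  by_cases c2 : PySem.Str.isIn "llama3" (PySem.Str.lower model_key) = true
  · have hB := pv_alt_eq_of_row model_key 2 8192
      ⟨(["llama3"], ((2 : Int), (8192 : Int))), by decide, rfl, by simp only [List.any_cons, List.any_nil, Bool.or_false]; exact c2⟩
      (by intro row hrow hlt; fin_cases hrow <;> simp_all)
    have hA : estimate_context_window_py model_key = 8192 := by
      simp only [estimate_context_window_py, c0, c1, c2, if_true, Bool.false_eq_true, if_false, ite_self]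
    rw [hA, hB]
  rw [Bool.not_eq_true] at c2
  by_cases c3 : (["llama2", "llama"].any (fun x => PySem.Str.isIn x (PySem.Str.lower model_key))) = true
  · have hB := pv_alt_eq_of_row model_key 3 4096
      ⟨(["llama2", "llama"], ((3 : Int), (4096 : Int))), by decide, rfl, c3⟩
      (by intro row hrow hlt; fin_cases hrow <;> simp_all)
    have hA : estimate_context_window_py model_key = 4096 := by
      simp only [estimate_context_window_py, c0, c1, c2, c3, if_true, Bool.false_eq_true, if_false, ite_self]
    rw [hA, hB]
  rw [Bool.not_eq_true] at c3
  by_cases c4 : (["qwen2.5", "qwen3"].any (fun x => PySem.Str.isIn x (PySem.Str.lower model_key))) = true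
  · have hB := pv_alt_eq_of_row model_key 4 128000
      ⟨(["qwen2.5", "qwen3"], ((4 : Int), (128000 : Int))), by decide, rfl, c4⟩
      (by intro row hrow hlt; fin_cases hrow <;> simp_all)
    have hA : estimate_context_window_py model_key = 128000 := by
      simp only [estimate_context_window_py, c0, c1, c2, c3, c4, if_true, Bool.false_eq_true, if_false, ite_self]
    rw [hA, hB]
  rw [Bool.not_eq_true] at c4
  by_cases c5 : PySem.Str.isIn "qwen2" (PySem.Str.lower model_key) = true
  · have hB := pv_alt_eq_of_row model_key 5 32768
      ⟨(["qwen2"], ((5 : Int), (32768 : Int))), by decide, rfl, by simp only [List.any_cons, List.any_nil, Bool.or_false]; exact c5⟩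
      (by intro row hrow hlt; fin_cases hrow <;> simp_all)
    have hA : estimate_context_window_py model_key = 32768 := by
      simp only [estimate_context_window_py, c0, c1, c2, c3, c4, c5, if_true, Bool.false_eq_true, if_false, ite_self]
    rw [hA, hB]
  rw [Bool.not_eq_true] at c5
  by_cases c6 : PySem.Str.isIn "qwen" (PySem.Str.lower model_key) = true
  · have hB := pv_alt_eq_of_row model_key 6 8192
      ⟨(["qwen"], ((6 : Int), (8192 : Int))), by decide, rfl, by simp only [List.any_cons, List.any_nil, Bool.or_false]; exact c6⟩
      (by intro row hrow hlt; fin_cases hrow <;> simp_all)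
    have hA : estimate_context_window_py model_key = 8192 := by
      simp only [estimate_context_window_py, c0, c1, c2, c3, c4, c5, c6, if_true, Bool.false_eq_true, if_false, ite_self]
    rw [hA, hB]
  rw [Bool.not_eq_true] at c6
  by_cases c7 : (["mistral", "mixtral"].any (fun x => PySem.Str.isIn x (PySem.Str.lower model_key))) = true
  · have hB := pv_alt_eq_of_row model_key 7 32768
      ⟨(["mistral", "mixtral"], ((7 : Int), (32768 : Int))), by decide, rfl, c7⟩
      (by intro row hrow hlt; fin_cases hrow <;> simp_all)
    have hA : estimate_context_window_py model_key = 32768 := by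
      simp only [estimate_context_window_py, c0, c1, c2, c3, c4, c5, c6, c7, if_true, Bool.false_eq_true, if_false, ite_self]
    rw [hA, hB]
  rw [Bool.not_eq_true] at c7
  by_cases c8 : (["phi3.5", "phi-3.5"].any (fun x => PySem.Str.isIn x (PySem.Str.lower model_key))) = true
  · have hB := pv_alt_eq_of_row model_key 8 128000
      ⟨(["phi3.5", "phi-3.5"], ((8 : Int), (128000 : Int))), by decide, rfl, c8⟩
      (by intro row hrow hlt; fin_cases hrow <;> simp_all)
    have hA : estimate_context_window_py model_key = 128000 := by
      simp only [estimate_context_window_py, c0, c1, c2, c3, c4, c5, c6, c7, c8, if_true, Bool.false_eq_true, if_false, ite_self]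
    rw [hA, hB]
  rw [Bool.not_eq_true] at c8
  by_cases c9 : (["phi3", "phi-3"].any (fun x => PySem.Str.isIn x (PySem.Str.lower model_key))) = true
  · have hB := pv_alt_eq_of_row model_key 9 4096
      ⟨(["phi3", "phi-3"], ((9 : Int), (4096 : Int))), by decide, rfl, c9⟩
      (by intro row hrow hlt; fin_cases hrow <;> simp_all)
    have hA : estimate_context_window_py model_key = 4096 := by
      simp only [estimate_context_window_py, c0, c1, c2, c3, c4, c5, c6, c7, c8, c9, if_true, Bool.false_eq_true, if_false, ite_self]
    rw [hA, hB]
  rw [Bool.not_eq_true] at c9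
  by_cases c10 : PySem.Str.isIn "phi" (PySem.Str.lower model_key) = true
  · have hB := pv_alt_eq_of_row model_key 10 2048
      ⟨(["phi"], ((10 : Int), (2048 : Int))), by decide, rfl, by simp only [List.any_cons, List.any_nil, Bool.or_false]; exact c10⟩
      (by intro row hrow hlt; fin_cases hrow <;> simp_all)
    have hA : estimate_context_window_py model_key = 2048 := by
      simp only [estimate_context_window_py, c0, c1, c2, c3, c4, c5, c6, c7, c8, c9, c10, if_true, Bool.false_eq_true, if_false, ite_self]
    rw [hA, hB]
  rw [Bool.not_eq_true] at c10
  by_cases c11 : (["gemma2", "gemma-2"].any (fun x => PySem.Str.isIn x (PySem.Str.lower model_key))) = true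
  · have hB := pv_alt_eq_of_row model_key 11 8192
      ⟨(["gemma2", "gemma-2"], ((11 : Int), (8192 : Int))), by decide, rfl, c11⟩
      (by intro row hrow hlt; fin_cases hrow <;> simp_all)
    have hA : estimate_context_window_py model_key = 8192 := by
      simp only [estimate_context_window_py, c0, c1, c2, c3, c4, c5, c6, c7, c8, c9, c10, c11, if_true, Bool.false_eq_true, if_false, ite_self]
    rw [hA, hB]
  rw [Bool.not_eq_true] at c11
  by_cases c12 : PySem.Str.isIn "gemma" (PySem.Str.lower model_key) = true
  · have hB := pv_alt_eq_of_row model_key 12 8192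
      ⟨(["gemma"], ((12 : Int), (8192 : Int))), by decide, rfl, by simp only [List.any_cons, List.any_nil, Bool.or_false]; exact c12⟩
      (by intro row hrow hlt; fin_cases hrow <;> simp_all)
    have hA : estimate_context_window_py model_key = 8192 := by
      simp only [estimate_context_window_py, c0, c1, c2, c3, c4, c5, c6, c7, c8, c9, c10, c11, c12, if_true, Bool.false_eq_true, if_false, ite_self]
    rw [hA, hB]
  rw [Bool.not_eq_true] at c12
  by_cases c13 : (["deepseek-coder", "deepseek"].any (fun x => PySem.Str.isIn x (PySem.Str.lower model_key))) = true
  · have hB := pv_alt_eq_of_row model_key 13 16384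
      ⟨(["deepseek-coder", "deepseek"], ((13 : Int), (16384 : Int))), by decide, rfl, c13⟩
      (by intro row hrow hlt; fin_cases hrow <;> simp_all)
    have hA : estimate_context_window_py model_key = 16384 := by
      simp only [estimate_context_window_py, c0, c1, c2, c3, c4, c5, c6, c7, c8, c9, c10, c11, c12, c13, if_true, Bool.false_eq_true, if_false, ite_self]
    rw [hA, hB]
  rw [Bool.not_eq_true] at c13
  by_cases c14 : (["embed", "embedding"].any (fun x => PySem.Str.isIn x (PySem.Str.lower model_key))) = true
  · have hB := pv_alt_eq_of_row model_key 14 512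
      ⟨(["embed", "embedding"], ((14 : Int), (512 : Int))), by decide, rfl, c14⟩
      (by intro row hrow hlt; fin_cases hrow <;> simp_all)
    have hA : estimate_context_window_py model_key = 512 := by
      simp only [estimate_context_window_py, c0, c1, c2, c3, c4, c5, c6, c7, c8, c9, c10, c11, c12, c13, c14, if_true, Bool.false_eq_true, if_false, ite_self]
    rw [hA, hB]
  rw [Bool.not_eq_true] at c14
  have hB := pv_alt_default model_key (by intro row hrow; fin_cases hrow <;> simp_all)
  have hA : estimate_context_window_py model_key = 8192 := by
    simp only [estimate_context_window_py, c0, c1, c2, c3, c4, c5, c6, c7, c8, c9, c10, c11, c12, c13, c14, Bool.false_eq_true, if_false, ite_self]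
  rw [hA, hB]

theorem estimate_context_window_py_changed : Claim_changed_estimate_context_window_py := by
  unfold Claim_changed_estimate_context_window_py; decide

theorem estimate_context_window_py_tight : Claim_exact_estimate_context_window_py := by
  intro model_key _ hD
  have hllama := pv_llama_of_D model_key hD
  rw [pv_alt_of_D model_key hD]
  simp only [estimate_context_window_py]
  have h3 : (["llama2", "llama"].any
      (fun x => PySem.Str.isIn x (PySem.Str.lower model_key))) = true := by
    simp only [List.any_cons, List.any_nil, Bool.or_eq_true]
    exact Or.inr (Or.inl hllama)
  by_cases c1 : (["llama3.3", "llama3.2", "llama3.1"].any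
      (fun x => PySem.Str.isIn x (PySem.Str.lower model_key))) = true
  · simp only [c1, if_true]; decide
  · by_cases c2 : PySem.Str.isIn "llama3" (PySem.Str.lower model_key) = true
    · simp only [c1, c2, if_true, if_false, Bool.false_eq_true]; decide
    · simp only [c1, c2, h3, if_true, if_false, Bool.false_eq_true]
      decide
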